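-- pv_equiv track=rewrite | github.com/yutao-li/leetcode | two sigma/largest group in company.py | solution
-- ===== SOURCE A (Python) =====
-- from collections import defaultdict
--
-- def solution(relations: [int, int, int]) -> [int]:
--     def dfs(i):
--         seen.add(i)
--         cur_group.append(i)
--         for j in adj[i]:
--             if j not in seen:
--                 dfs(j)
--
--     company = defaultdict(list)
--     for a, b, c in relations:
--         company[c].append([a, b])
--     res = []
--     for pairs in company.values():
--         adj = defaultdict(list)
--         for a, b in pairs:
--             adj[a].append(b)
--             adj[b].append(a)
--         people = list(adj.keys())
--         seen = set()
--         for i in people: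
--             if i not in seen:
--                 cur_group = []
--                 dfs(i)
--                 if len(cur_group) > len(res):
--                     res = cur_group
--     return res
-- ===== SOURCE B (Python) =====
-- def solution(relations):
--     company = {}
--     for a, b, c in relations:
--         company.setdefault(c, []).append((a, b))
--     groups = []
--     for pairs in company.values():
--         adj = {}
--         for a, b in pairs:
--             adj.setdefault(a, []).append(b)
--             adj.setdefault(b, []).append(a)
--         seen = set()
--         for start in adj:
--             if start not in seen:
--                 group = []
--                 stack = [start]
--                 while stack:
--                     i = stack.pop()
--                     if i not in seen:
--                         seen.add(i)
--                         group.append(i)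
--                         stack.extend(reversed(adj[i]))
--                 groups.append(group)
--     return max(groups, key=len, default=[])
-- ===== Notes on version B (the rewrite author's own statement) =====
-- stated objective: alternative
-- what changed: The recursive DFS is replaced by an explicit-stack DFS (pop, skip-if-seen, push reversed neighbours) built on plain dicts with setdefault, and the running strict-greater comparison of group lengths is replaced by collecting all groups and taking max by length with an empty-list default, which keeps the first maximal group exactly like A's strict comparison.
import Mathlib
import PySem

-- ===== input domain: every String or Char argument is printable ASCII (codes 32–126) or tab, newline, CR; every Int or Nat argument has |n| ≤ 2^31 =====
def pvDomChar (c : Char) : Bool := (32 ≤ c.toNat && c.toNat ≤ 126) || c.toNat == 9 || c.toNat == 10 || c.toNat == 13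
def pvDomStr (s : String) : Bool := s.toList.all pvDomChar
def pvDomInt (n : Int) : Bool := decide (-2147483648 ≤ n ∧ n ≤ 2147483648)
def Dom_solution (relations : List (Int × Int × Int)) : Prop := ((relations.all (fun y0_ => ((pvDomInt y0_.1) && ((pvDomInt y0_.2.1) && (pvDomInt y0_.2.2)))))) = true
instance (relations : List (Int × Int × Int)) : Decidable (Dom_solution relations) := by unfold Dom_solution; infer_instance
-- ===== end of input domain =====

-- B replaces A's recursive DFS by an explicit-stack DFS and collects all groups,
-- returning the first longest one via max-by-length (objective: alternative).

-- ===== PORT A =====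
-- company = defaultdict(list); company[c].append([a, b])
def pvCompanyA (relations : List (Int × Int × Int)) : PySem.Dict Int (List (Int × Int)) :=
  relations.foldl (fun d t => d.modify t.2.2 [] (fun l => l ++ [(t.1, t.2.1)])) PySem.Dict.empty

-- adj = defaultdict(list); adj[a].append(b); adj[b].append(a)
def pvAdjA (pairs : List (Int × Int)) : PySem.Dict Int (List Int) :=
  pairs.foldl
    (fun d p => (d.modify p.1 [] (fun l => l ++ [p.2])).modify p.2 [] (fun l => l ++ [p.1]))
    PySem.Dict.empty

-- A's recursive dfs: seen.add(i); cur_group.append(i); for j in adj[i]: if j not in seen: dfs(j).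
-- The Nat argument is only a totality device (the recursion depth of the Python is bounded by
-- the number of distinct nodes, so the fuel passed in `solution` is never exhausted).
mutual
def pvDfs (adj : PySem.Dict Int (List Int)) : Nat → Int → PySem.Set Int → List Int → PySem.Set Int × List Int
  | 0, _, seen, cur => (seen, cur)
  | n+1, i, seen, cur => pvDfsL adj n (adj.getD i []) (PySem.Set.add seen i) (cur ++ [i])
termination_by n _ _ _ => (n, 0)

def pvDfsL (adj : PySem.Dict Int (List Int)) : Nat → List Int → PySem.Set Int → List Int → PySem.Set Int × List Int
  | _, [], seen, cur => (seen, cur)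
  | n, j :: rest, seen, cur =>
    if PySem.Set.contains seen j then pvDfsL adj n rest seen cur
    else
      let p := pvDfs adj n j seen cur
      pvDfsL adj n rest p.1 p.2
termination_by n l _ _ => (n, l.length + 1)
end

def solution (relations : List (Int × Int × Int)) : List Int :=
  let company := pvCompanyA relations
  company.values.foldl (fun res pairs =>
    let adj := pvAdjA pairs
    let people := adj.keys
    (people.foldl (fun st i =>
        if PySem.Set.contains st.1 i then st
        else
          let p := pvDfs adj (2 * pairs.length + 1) i st.1 []
          (p.1, if p.2.length > st.2.length then p.2 else st.2))
      ((PySem.Set.empty : PySem.Set Int), res)).2) []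

-- ===== PORT B =====
-- company = {}; company.setdefault(c, []).append((a, b))
def pvCompanyB (relations : List (Int × Int × Int)) : PySem.Dict Int (List (Int × Int)) :=
  relations.foldl (fun d t => d.insert t.2.2 (d.getD t.2.2 [] ++ [(t.1, t.2.1)])) PySem.Dict.empty

-- adj = {}; adj.setdefault(a, []).append(b); adj.setdefault(b, []).append(a)
def pvAdjB (pairs : List (Int × Int)) : PySem.Dict Int (List Int) :=
  pairs.foldl
    (fun d p =>
      let d1 := d.insert p.1 (d.getD p.1 [] ++ [p.2])
      d1.insert p.2 (d1.getD p.2 [] ++ [p.1]))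
    PySem.Dict.empty

-- B's stack loop: while stack: i = stack.pop(); if i not in seen: mark, append, extend(reversed(adj[i])).
-- The Lean list holds the stack with its TOP AT THE HEAD (Python pops from the END of the list),
-- so Python's stack.extend(reversed(adj[i])) is prepending adj[i].  The Nat argument is a totality
-- device only: the loop pops at most 1 + sum-of-degrees times, below the fuel passed in solution_alt.
def pvRun (adj : PySem.Dict Int (List Int)) : Nat → List Int → PySem.Set Int → List Int → PySem.Set Int × List Int
  | 0, _, seen, group => (seen, group)
  | _+1, [], seen, group => (seen, group)
  | n+1, i :: stack, seen, group =>
    if PySem.Set.contains seen i then pvRun adj n stack seen group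
    else pvRun adj n (adj.getD i [] ++ stack) (PySem.Set.add seen i) (group ++ [i])

def solution_alt (relations : List (Int × Int × Int)) : List Int :=
  let company := pvCompanyB relations
  let groups := company.values.foldl (fun gs pairs =>
      let adj := pvAdjB pairs
      (adj.keys.foldl (fun st start =>
          if PySem.Set.contains st.1 start then st
          else
            let p := pvRun adj (2 * pairs.length + 2) [start] st.1 []
            (p.1, st.2 ++ [p.2]))
        ((PySem.Set.empty : PySem.Set Int), gs)).2) []
  (PySem.List.max? groups (fun g => g.length)).getD []

-- ===== PRECONDITION & SPEC =====
def Spec_solution (relations : List (Int × Int × Int)) (out : List Int) : Prop := out = solution_alt relations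
instance (relations : List (Int × Int × Int)) (out : List Int) : Decidable (Spec_solution relations out) := by unfold Spec_solution; infer_instance

-- ===== CLAIM (what is proved, stated in full; the proofs are below) =====
def Claim_equal_solution : Prop := ∀ (relations : List (Int × Int × Int)), Dom_solution relations → Spec_solution relations (solution relations)

-- ===== LEMMAS AND PROOFS =====

-- Set bridge lemmas
theorem pvSC (s : List Int) (k : Int) : PySem.Set.contains s k = decide (k ∈ s) := by
  simp [PySem.Set.contains]

theorem pvMemAdd (s : PySem.Set Int) (i k : Int) :
    (k ∈ PySem.Set.add s i) ↔ (k ∈ s ∨ k = i) := by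
  by_cases h : i ∈ s
  · simp only [PySem.Set.add, pvSC, h, decide_true, if_true]
    constructor
    · exact Or.inl
    · rintro (hk | rfl) <;> assumption
  · simp only [PySem.Set.add, pvSC, h, decide_false, Bool.false_eq_true, if_false,
      List.mem_append, List.mem_singleton]

-- number of adjacency keys not yet seen
def pvU (adj : PySem.Dict Int (List Int)) (s : PySem.Set Int) : Nat :=
  (adj.keys.filter (fun k => !decide (k ∈ s))).length

theorem pvU_mono (adj : PySem.Dict Int (List Int)) {s s' : PySem.Set Int}
    (h : ∀ k, k ∈ s → k ∈ s') : pvU adj s' ≤ pvU adj s := by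
  apply List.Sublist.length_le
  apply List.monotone_filter_right
  intro a ha
  simp only [Bool.not_eq_true', decide_eq_false_iff_not] at *
  exact fun hs => ha (h a hs)

theorem pvFilterLt {p q : Int → Bool} (hpq : ∀ a, p a = true → q a = true) :
    ∀ (l : List Int) (i : Int), i ∈ l → q i = true → p i = false →
      (l.filter p).length < (l.filter q).length := by
  intro l
  induction l with
  | nil => intro i h; cases h
  | cons j t IH =>
    intro i hi hq hp
    rcases List.mem_cons.mp hi with rfl | hit
    · simp only [List.filter_cons, hp, hq, Bool.false_eq_true, if_false, if_true]
      have := List.Sublist.length_le (List.monotone_filter_right t hpq)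
      simp only [List.length_cons]
      omega
    · by_cases hj : p j = true
      · have hqj := hpq _ hj
        simp only [List.filter_cons, hj, hqj, if_true, List.length_cons]
        have := IH i hit hq hp
        omega
      · simp only [Bool.not_eq_true] at hj
        simp only [List.filter_cons, hj, Bool.false_eq_true, if_false]
        have h2 := IH i hit hq hp
        by_cases hqj : q j = true
        · simp only [hqj, if_true, List.length_cons]; omega
        · simp only [Bool.not_eq_true] at hqj
          simp only [hqj, Bool.false_eq_true, if_false]; omega

theorem pvU_add_lt (adj : PySem.Dict Int (List Int)) {s : PySem.Set Int} {i : Int}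
    (hk : i ∈ adj.keys) (hc : i ∉ s) : pvU adj (PySem.Set.add s i) < pvU adj s := by
  apply pvFilterLt (p := fun k => !decide (k ∈ PySem.Set.add s i)) (q := fun k => !decide (k ∈ s))
  · intro a ha
    simp only [Bool.not_eq_true', decide_eq_false_iff_not] at *
    intro hs; exact ha ((pvMemAdd s i a).mpr (Or.inl hs))
  · exact hk
  · simp [hc]
  · simp

theorem pvU_add_eq (adj : PySem.Dict Int (List Int)) {s : PySem.Set Int} {i : Int}
    (hk : i ∉ adj.keys) : pvU adj (PySem.Set.add s i) = pvU adj s := by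
  unfold pvU
  congr 1
  apply List.filter_congr
  intro k hkk
  have hne : k ≠ i := fun e => hk (e ▸ hkk)
  simp [hne]

-- the ideal DFS machine: pending list of nodes; pop, skip if seen, else mark/emit and prepend neighbours
def pvVisit (adj : PySem.Dict Int (List Int)) : List Int → PySem.Set Int → List Int → PySem.Set Int × List Int
  | [], s, c => (s, c)
  | i :: rest, s, c =>
    if hc : i ∈ s then pvVisit adj rest s c
    else if hk : i ∈ adj.keys then pvVisit adj (adj.getD i [] ++ rest) (PySem.Set.add s i) (c ++ [i])
    else pvVisit adj rest (PySem.Set.add s i) (c ++ [i])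
termination_by pending s _ => (pvU adj s, pending.length)
decreasing_by
  all_goals simp_wf
  · exact Prod.Lex.right _ (by omega)
  · exact Prod.Lex.left _ _ (pvU_add_lt adj hk hc)
  · rw [pvU_add_eq adj hk]; exact Prod.Lex.right _ (by omega)

theorem pvVisit_seen_mem (adj : PySem.Dict Int (List Int)) :
    ∀ (pend : List Int) (s : PySem.Set Int) (c : List Int) (k : Int),
      k ∈ s → k ∈ (pvVisit adj pend s c).1 := by
  intro pend s c
  induction pend, s, c using pvVisit.induct adj with
  | case1 s c => intro k hk; simpa [pvVisit] using hk
  | case2 i rest s c hc IH => intro k hk; rw [pvVisit]; simp only [dif_pos hc]; exact IH k hk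
  | case3 i rest s c hc hk' IH =>
    intro k hk
    rw [pvVisit]; simp only [dif_neg hc, dif_pos hk']
    exact IH k ((pvMemAdd s i k).mpr (Or.inl hk))
  | case4 i rest s c hc hk' IH =>
    intro k hk
    rw [pvVisit]; simp only [dif_neg hc, dif_neg hk']
    exact IH k ((pvMemAdd s i k).mpr (Or.inl hk))

theorem pvVisit_append (adj : PySem.Dict Int (List Int)) :
    ∀ (N : Nat) (L : List Int) (s : PySem.Set Int) (c st : List Int), pvU adj s ≤ N →
      pvVisit adj (L ++ st) s c =
        (let p := pvVisit adj L s c; pvVisit adj st p.1 p.2) := by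
  intro N
  induction N with
  | zero =>
    intro L
    induction L with
    | nil => intro s c st _; simp [pvVisit]
    | cons i L IHL =>
      intro s c st hN
      by_cases hc : i ∈ s
      · rw [List.cons_append, pvVisit, dif_pos hc]
        conv_rhs => rw [pvVisit, dif_pos hc]
        exact IHL s c st hN
      · by_cases hk : i ∈ adj.keys
        · exfalso
          have : i ∈ adj.keys.filter (fun k => !decide (k ∈ s)) := by
            simp [List.mem_filter, hk, hc]
          have := List.length_pos_of_mem this  -- placeholder name
          unfold pvU at hN; omega
        · rw [List.cons_append, pvVisit, dif_neg hc, dif_neg hk]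
          conv_rhs => rw [pvVisit, dif_neg hc, dif_neg hk]
          exact IHL (PySem.Set.add s i) (c ++ [i]) st (by rw [pvU_add_eq adj hk]; exact hN)
  | succ n IHN =>
    intro L
    induction L with
    | nil => intro s c st _; simp [pvVisit]
    | cons i L IHL =>
      intro s c st hN
      by_cases hc : i ∈ s
      · rw [List.cons_append, pvVisit, dif_pos hc]
        conv_rhs => rw [pvVisit, dif_pos hc]
        exact IHL s c st hN
      · by_cases hk : i ∈ adj.keys
        · rw [List.cons_append, pvVisit, dif_neg hc, dif_pos hk]
          conv_rhs => rw [pvVisit, dif_neg hc, dif_pos hk]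
          rw [← List.append_assoc]
          exact IHN (adj.getD i [] ++ L) (PySem.Set.add s i) (c ++ [i]) st
            (by have := pvU_add_lt adj hk hc; omega)
        · rw [List.cons_append, pvVisit, dif_neg hc, dif_neg hk]
          conv_rhs => rw [pvVisit, dif_neg hc, dif_neg hk]
          exact IHL (PySem.Set.add s i) (c ++ [i]) st (by rw [pvU_add_eq adj hk]; exact hN)

-- total length of unvisited adjacency lists
def pvS (adj : PySem.Dict Int (List Int)) (s : PySem.Set Int) : Nat :=
  ((adj.keys.filter (fun k => !decide (k ∈ s))).map (fun k => (adj.getD k []).length)).sum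

theorem pvS_decomp (adj : PySem.Dict Int (List Int)) {s : PySem.Set Int} {i : Int}
    (hnd : adj.keys.Nodup) (hk : i ∈ adj.keys) (hc : i ∉ s) :
    pvS adj s = (adj.getD i []).length + pvS adj (PySem.Set.add s i) := by
  unfold pvS
  have key : ∀ (l : List Int), l.Nodup → i ∈ l →
      ((l.filter (fun k => !decide (k ∈ s))).map (fun k => (adj.getD k []).length)).sum =
      (adj.getD i []).length +
        ((l.filter (fun k => !decide (k ∈ PySem.Set.add s i))).map (fun k => (adj.getD k []).length)).sum := by
    intro l
    induction l with
    | nil => intro _ h; cases h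
    | cons j t IH =>
      intro hnd hil
      have hndt := hnd.of_cons
      rcases List.mem_cons.mp hil with rfl | hit
      · have hjt : i ∉ t := (List.nodup_cons.mp hnd).1
        have h1 : (!decide (i ∈ s)) = true := by simp [hc]
        have h2 : (!decide (i ∈ PySem.Set.add s i)) = false := by simp
        simp only [List.filter_cons, h1, h2, if_true, Bool.false_eq_true, if_false,
          List.map_cons, List.sum_cons]
        have hft : List.filter (fun k => !decide (k ∈ s)) t
            = List.filter (fun k => !decide (k ∈ PySem.Set.add s i)) t := by
          apply List.filter_congr
          intro k hkt
          have : k ≠ i := fun e => hjt (e ▸ hkt)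
          simp [this]
        rw [hft]
      · have hji : j ≠ i := fun e => (List.nodup_cons.mp hnd).1 (e ▸ hit)
        have heq : (!decide (j ∈ PySem.Set.add s i)) = (!decide (j ∈ s)) := by
          simp [hji]
        simp only [List.filter_cons, heq]
        by_cases hj : (!decide (j ∈ s)) = true
        · simp only [hj, if_true, List.map_cons, List.sum_cons, IH hndt hit]; omega
        · simp only [Bool.not_eq_true] at hj
          simp only [hj, Bool.false_eq_true, if_false, IH hndt hit]
  exact key adj.keys hnd hk

theorem pvS_add_eq (adj : PySem.Dict Int (List Int)) {s : PySem.Set Int} {i : Int}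
    (hk : i ∉ adj.keys) : pvS adj (PySem.Set.add s i) = pvS adj s := by
  unfold pvS
  congr 2
  apply List.filter_congr
  intro k hkk
  have : k ≠ i := fun e => hk (e ▸ hkk)
  simp [this]

theorem pvS_le_empty (adj : PySem.Dict Int (List Int)) (s : PySem.Set Int) :
    pvS adj s ≤ pvS adj [] := by
  unfold pvS
  apply List.Sublist.sum_le_sum
  · apply List.Sublist.map
    apply List.monotone_filter_right
    intro a ha
    simp
  · intro b _; exact Nat.zero_le b

theorem pvRun_eq_visit (adj : PySem.Dict Int (List Int)) (hnd : adj.keys.Nodup) :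
    ∀ (n : Nat) (st : List Int) (s : PySem.Set Int) (c : List Int),
      st.length + pvS adj s ≤ n → pvRun adj n st s c = pvVisit adj st s c := by
  intro n
  induction n with
  | zero =>
    intro st s c h
    have : st = [] := by
      cases st with
      | nil => rfl
      | cons a t => simp [List.length_cons] at h
    subst this; simp [pvRun, pvVisit]
  | succ n IH =>
    intro st s c h
    cases st with
    | nil => simp [pvRun, pvVisit]
    | cons i t =>
      by_cases hc : i ∈ s
      · rw [pvRun]
        simp only [pvSC, hc, decide_true, if_true]
        rw [IH t s c (by simp [List.length_cons] at h; omega)]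
        rw [pvVisit, dif_pos hc]
      · rw [pvRun]
        simp only [pvSC, hc, decide_false, Bool.false_eq_true, if_false]
        by_cases hk : i ∈ adj.keys
        · rw [IH _ _ _ ?_]
          · rw [pvVisit, dif_neg hc, dif_pos hk]
          · have hd := pvS_decomp adj hnd hk hc
            simp only [List.length_append, List.length_cons] at h ⊢
            omega
        · have hnc : adj.contains i = false := by
            rw [← Bool.not_eq_true]
            simp [PySem.Dict.contains_iff_mem_keys, hk]
          have hg : adj.getD i [] = [] := PySem.Dict.getD_of_not_contains adj [] hnc
          rw [hg, List.nil_append]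
          rw [IH t _ _ (by rw [pvS_add_eq adj hk]; simp [List.length_cons] at h; omega)]
          rw [pvVisit, dif_neg hc, dif_neg hk]

theorem pvU_visit_le (adj : PySem.Dict Int (List Int)) (pend : List Int) (s : PySem.Set Int)
    (c : List Int) : pvU adj (pvVisit adj pend s c).1 ≤ pvU adj s :=
  pvU_mono adj (fun k hk => pvVisit_seen_mem adj pend s c k hk)

theorem pvDfs_eq (adj : PySem.Dict Int (List Int)) :
    ∀ n : Nat,
      (∀ (i : Int) (s : PySem.Set Int) (c : List Int), i ∉ s → pvU adj s < n →
        pvDfs adj n i s c = pvVisit adj [i] s c) ∧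
      (∀ (L : List Int) (s : PySem.Set Int) (c : List Int), pvU adj s < n →
        pvDfsL adj n L s c = pvVisit adj L s c) := by
  intro n
  induction n using Nat.strong_induction_on with
  | _ n IHn =>
    have h1 : ∀ (i : Int) (s : PySem.Set Int) (c : List Int), i ∉ s → pvU adj s < n →
        pvDfs adj n i s c = pvVisit adj [i] s c := by
      intro i s c hi hn
      cases n with
      | zero => omega
      | succ m =>
        rw [pvDfs]
        by_cases hk : i ∈ adj.keys
        · have hlt : pvU adj (PySem.Set.add s i) < m := by
            have h1 := pvU_add_lt adj hk hi
            omega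
          rw [(IHn m (by omega)).2 _ _ _ hlt]
          conv_rhs => rw [pvVisit, dif_neg hi, dif_pos hk]
          rw [List.append_nil]
        · have hnc : adj.contains i = false := by
            rw [← Bool.not_eq_true]
            simp [PySem.Dict.contains_iff_mem_keys, hk]
          rw [PySem.Dict.getD_of_not_contains adj [] hnc, pvDfsL]
          conv_rhs => rw [pvVisit, dif_neg hi, dif_neg hk]
          rw [pvVisit]
    have h2 : ∀ (L : List Int) (s : PySem.Set Int) (c : List Int), pvU adj s < n →
        pvDfsL adj n L s c = pvVisit adj L s c := by
      intro L
      induction L with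
      | nil =>
        intro s c hn
        cases n with
        | zero => omega
        | succ m => rw [pvDfsL, pvVisit]
      | cons j L IHL =>
        intro s c hn
        cases n with
        | zero => omega
        | succ m =>
          by_cases hj : j ∈ s
          · rw [pvDfsL]
            simp only [pvSC, hj, decide_true, if_true]
            rw [IHL s c hn]
            conv_rhs => rw [pvVisit, dif_pos hj]
          · rw [pvDfsL]
            simp only [pvSC, hj, decide_false, Bool.false_eq_true, if_false]
            rw [h1 j s c hj hn]
            have hU : pvU adj (pvVisit adj [j] s c).1 < m + 1 :=
              lt_of_le_of_lt (pvU_visit_le adj [j] s c) hn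
            rw [IHL _ _ hU]
            rw [show (j :: L) = [j] ++ L from rfl,
              pvVisit_append adj (pvU adj s) [j] s c L le_rfl]
    exact ⟨h1, h2⟩

-- total stored adjacency-list length of a dict
def pvDS (d : PySem.Dict Int (List Int)) : Nat :=
  (d.items.map (fun p => p.2.length)).sum

theorem pvUpdSum (k : Int) (w : List Int) :
    ∀ (l : List (Int × List Int)), (l.map Prod.fst).Nodup →
      ∀ u, l.find? (fun p => p.1 == k) = some u → w.length = u.2.length + 1 →
        ((l.map (fun p => if (p.1 == k) = true then (k, w) else p)).map (fun p => p.2.length)).sum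
          = (l.map (fun p => p.2.length)).sum + 1 := by
  intro l
  induction l with
  | nil => intro _ u hu; simp at hu
  | cons h t IH =>
    intro hnd u hu hw
    have hnd' : (h.1 :: t.map Prod.fst).Nodup := by simpa using hnd
    by_cases hh : (h.1 == k) = true
    · have hk : h.1 = k := by simpa using hh
      have hu' : u = h := by
        rw [List.find?_cons_of_pos (p := fun p : Int × List Int => p.1 == k) hh] at hu
        exact (Option.some.inj hu).symm
      subst hu'
      have hkt : k ∉ t.map Prod.fst := by
        have h5 := (List.nodup_cons.mp hnd').1
        rwa [hk] at h5
      have htid : t.map (fun p => if (p.1 == k) = true then (k, w) else p) = t.map id := by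
        apply List.map_congr_left
        intro p hp
        have hne : p.1 ≠ k := fun e => hkt (e ▸ List.mem_map_of_mem hp)
        simp [hne]
      simp only [List.map_cons, hh, if_true, htid, List.map_id, List.sum_cons]
      omega
    · simp only [List.map_cons, hh, Bool.false_eq_true, if_false, List.sum_cons]
      rw [List.find?_cons_of_neg (p := fun p : Int × List Int => p.1 == k) hh] at hu
      rw [IH (List.nodup_cons.mp hnd').2 u hu hw]
      omega

theorem pvModify_facts (d : PySem.Dict Int (List Int)) (hnd : d.keys.Nodup) (k v : Int) :
    (d.modify k [] (fun l => l ++ [v])).keys.Nodup ∧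
    (d.modify k [] (fun l => l ++ [v])).keys.length ≤ d.keys.length + 1 ∧
    pvDS (d.modify k [] (fun l => l ++ [v])) = pvDS d + 1 := by
  simp only [PySem.Dict.modify]
  by_cases hc : d.contains k = true
  · refine ⟨?_, ?_, ?_⟩
    · rw [PySem.Dict.keys_insert_of_contains d _ hc]; exact hnd
    · rw [PySem.Dict.keys_insert_of_contains d _ hc]; omega
    · unfold pvDS
      rw [PySem.Dict.items_insert_of_contains d _ hc]
      have hex : (d.items.find? (fun p => p.1 == k)).isSome = true := by
        rw [List.find?_isSome]
        have : d.items.any (fun p => p.1 == k) = true := hc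
        simpa [List.any_eq_true] using this
      obtain ⟨u, hu⟩ := Option.isSome_iff_exists.mp hex
      have hgd : d.getD k [] = u.2 := by
        rw [PySem.Dict.getD_eq_get?_getD]
        show (Option.map (fun x => x.2) (List.find? (fun p => p.1 == k) d.items)).getD [] = u.2
        rw [hu]; rfl
      exact pvUpdSum k (d.getD k [] ++ [v]) d.items hnd u hu (by rw [hgd]; simp)
  · have hc' : d.contains k = false := by simpa using hc
    refine ⟨?_, ?_, ?_⟩
    · rw [PySem.Dict.keys_insert_of_not_contains d _ hc']
      apply List.Nodup.append hnd (List.nodup_singleton k)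
      intro a ha hb
      simp only [List.mem_singleton] at hb
      rw [hb] at ha
      have hmem := (PySem.Dict.contains_iff_mem_keys d k).mpr ha
      rw [hc'] at hmem
      cases hmem
    · rw [PySem.Dict.keys_insert_of_not_contains d _ hc']; simp
    · unfold pvDS
      rw [PySem.Dict.items_insert_of_not_contains d _ hc']
      rw [PySem.Dict.getD_of_not_contains d [] hc']
      simp

theorem pvAdj_facts :
    ∀ (pairs : List (Int × Int)) (d : PySem.Dict Int (List Int)), d.keys.Nodup →
      (pairs.foldl
        (fun d p => (d.modify p.1 [] (fun l => l ++ [p.2])).modify p.2 [] (fun l => l ++ [p.1]))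
        d).keys.Nodup ∧
      (pairs.foldl
        (fun d p => (d.modify p.1 [] (fun l => l ++ [p.2])).modify p.2 [] (fun l => l ++ [p.1]))
        d).keys.length ≤ d.keys.length + 2 * pairs.length ∧
      pvDS (pairs.foldl
        (fun d p => (d.modify p.1 [] (fun l => l ++ [p.2])).modify p.2 [] (fun l => l ++ [p.1]))
        d) = pvDS d + 2 * pairs.length := by
  intro pairs
  induction pairs with
  | nil => intro d hnd; exact ⟨hnd, by simp, by simp⟩
  | cons p ps IH =>
    intro d hnd
    simp only [List.foldl_cons]
    obtain ⟨n1, l1, s1⟩ := pvModify_facts d hnd p.1 p.2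
    obtain ⟨n2, l2, s2⟩ := pvModify_facts _ n1 p.2 p.1
    obtain ⟨n3, l3, s3⟩ := IH _ n2
    refine ⟨n3, ?_, ?_⟩
    · simp only [List.length_cons]; omega
    · simp only [List.length_cons]; omega

theorem pvAdjA_nodup (pairs : List (Int × Int)) : (pvAdjA pairs).keys.Nodup :=
  (pvAdj_facts pairs PySem.Dict.empty (by simp [PySem.Dict.empty, PySem.Dict.keys])).1

theorem pvAdjA_keys_len (pairs : List (Int × Int)) :
    (pvAdjA pairs).keys.length ≤ 2 * pairs.length := by
  have := (pvAdj_facts pairs PySem.Dict.empty (by simp [PySem.Dict.empty, PySem.Dict.keys])).2.1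
  simpa [PySem.Dict.empty, PySem.Dict.keys, pvAdjA] using this

theorem pvAdjA_DS (pairs : List (Int × Int)) : pvDS (pvAdjA pairs) = 2 * pairs.length := by
  have := (pvAdj_facts pairs PySem.Dict.empty (by simp [PySem.Dict.empty, PySem.Dict.keys])).2.2
  simpa [PySem.Dict.empty, pvDS, PySem.Dict.items, pvAdjA] using this

theorem pvS_empty_eq_DS (adj : PySem.Dict Int (List Int)) (hnd : adj.keys.Nodup) :
    pvS adj [] = pvDS adj := by
  unfold pvS pvDS
  rw [PySem.Dict.items_eq_map_keys adj hnd []]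
  rw [List.map_map]
  simp only [List.not_mem_nil, decide_false, Bool.not_false, List.filter_true]
  rfl

def pvMax : List Int → List Int → List Int := fun r g => if g.length > r.length then g else r

def pvGStep (pairs : List (Int × Int)) :
    (PySem.Set Int × List (List Int)) → Int → (PySem.Set Int × List (List Int)) :=
  fun st i =>
    if i ∈ st.1 then st
    else (let p := pvVisit (pvAdjA pairs) [i] st.1 []; (p.1, st.2 ++ [p.2]))

def pvGF (pairs : List (Int × Int)) (people : List Int) (s : PySem.Set Int) :
    PySem.Set Int × List (List Int) :=
  people.foldl (pvGStep pairs) (s, [])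

theorem pvGF_acc (pairs : List (Int × Int)) :
    ∀ (people : List Int) (s : PySem.Set Int) (gs : List (List Int)),
      people.foldl (pvGStep pairs) (s, gs)
        = ((pvGF pairs people s).1, gs ++ (pvGF pairs people s).2) := by
  intro people
  induction people with
  | nil => intro s gs; simp [pvGF]
  | cons i rest IH =>
    intro s gs
    by_cases h : i ∈ s
    · show List.foldl _ (pvGStep pairs (s, gs) i) rest = _
      have e1 : pvGStep pairs (s, gs) i = (s, gs) := by simp [pvGStep, h]
      have e2 : pvGF pairs (i :: rest) s = pvGF pairs rest s := by
        show List.foldl _ (pvGStep pairs (s, []) i) rest = _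
        have : pvGStep pairs (s, []) i = (s, []) := by simp [pvGStep, h]
        rw [this]; rfl
      rw [e1, e2]; exact IH s gs
    · show List.foldl _ (pvGStep pairs (s, gs) i) rest = _
      have e1 : pvGStep pairs (s, gs) i
          = ((pvVisit (pvAdjA pairs) [i] s []).1, gs ++ [(pvVisit (pvAdjA pairs) [i] s []).2]) := by
        simp [pvGStep, h]
      have e2 : pvGF pairs (i :: rest) s
          = ((pvGF pairs rest (pvVisit (pvAdjA pairs) [i] s []).1).1,
             [(pvVisit (pvAdjA pairs) [i] s []).2]
               ++ (pvGF pairs rest (pvVisit (pvAdjA pairs) [i] s []).1).2) := by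
        show List.foldl _ (pvGStep pairs (s, []) i) rest = _
        have e3 : pvGStep pairs (s, []) i
            = ((pvVisit (pvAdjA pairs) [i] s []).1, [] ++ [(pvVisit (pvAdjA pairs) [i] s []).2]) := by
          simp [pvGStep, h]
        rw [e3]
        exact IH _ _
      rw [e1, e2, IH _ _, List.append_assoc]

theorem pvU_le_keys (adj : PySem.Dict Int (List Int)) (s : PySem.Set Int) :
    pvU adj s ≤ adj.keys.length :=
  List.length_filter_le _ _

theorem pvStepA_eq (pairs : List (Int × Int)) :
    (fun (st : PySem.Set Int × List Int) (i : Int) =>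
        if PySem.Set.contains st.1 i then st
        else
          ((pvDfs (pvAdjA pairs) (2 * pairs.length + 1) i st.1 []).1,
           if (pvDfs (pvAdjA pairs) (2 * pairs.length + 1) i st.1 []).2.length > st.2.length then
             (pvDfs (pvAdjA pairs) (2 * pairs.length + 1) i st.1 []).2
           else st.2))
      = (fun st i =>
          if i ∈ st.1 then st
          else (let p := pvVisit (pvAdjA pairs) [i] st.1 []; (p.1, pvMax st.2 p.2))) := by
  funext st i
  by_cases h : i ∈ st.1
  · simp [h]
  · simp only [pvSC, h, decide_false, Bool.false_eq_true, if_false]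
    have hU : pvU (pvAdjA pairs) st.1 < 2 * pairs.length + 1 := by
      have h1 := pvU_le_keys (pvAdjA pairs) st.1
      have h2 := pvAdjA_keys_len pairs
      omega
    rw [(pvDfs_eq (pvAdjA pairs) (2 * pairs.length + 1)).1 i st.1 [] h hU]
    rfl

theorem pvStepB_eq (pairs : List (Int × Int)) :
    (fun (st : PySem.Set Int × List (List Int)) (start : Int) =>
        if PySem.Set.contains st.1 start then st
        else
          ((pvRun (pvAdjB pairs) (2 * pairs.length + 2) [start] st.1 []).1,
           st.2 ++ [(pvRun (pvAdjB pairs) (2 * pairs.length + 2) [start] st.1 []).2]))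
      = pvGStep pairs := by
  funext st start
  have hadj : pvAdjB pairs = pvAdjA pairs := rfl
  by_cases h : start ∈ st.1
  · simp [h, pvGStep]
  · simp only [pvSC, h, decide_false, Bool.false_eq_true, if_false, pvGStep]
    rw [hadj, pvRun_eq_visit (pvAdjA pairs) (pvAdjA_nodup pairs) (2 * pairs.length + 2) [start] st.1 []]
    have h1 := pvS_le_empty (pvAdjA pairs) st.1
    have h2 := pvS_empty_eq_DS (pvAdjA pairs) (pvAdjA_nodup pairs)
    have h3 := pvAdjA_DS pairs
    simp only [List.length_cons, List.length_nil]
    omega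

theorem pvFoldA (pairs : List (Int × Int)) :
    ∀ (people : List Int) (s : PySem.Set Int) (res : List Int),
      people.foldl
        (fun st i =>
          if i ∈ st.1 then st
          else (let p := pvVisit (pvAdjA pairs) [i] st.1 []; (p.1, pvMax st.2 p.2))) (s, res)
      = ((pvGF pairs people s).1, (pvGF pairs people s).2.foldl pvMax res) := by
  intro people
  induction people with
  | nil => intro s res; simp [pvGF]
  | cons i rest IH =>
    intro s res
    by_cases h : i ∈ s
    · have e2 : pvGF pairs (i :: rest) s = pvGF pairs rest s := by
        show List.foldl _ (pvGStep pairs (s, []) i) rest = _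
        have : pvGStep pairs (s, []) i = (s, []) := by simp [pvGStep, h]
        rw [this]; rfl
      simp only [List.foldl_cons, h, if_pos, e2]
      exact IH s res
    · set p := pvVisit (pvAdjA pairs) [i] s [] with hp
      have e2 : pvGF pairs (i :: rest) s = ((pvGF pairs rest p.1).1, [p.2] ++ (pvGF pairs rest p.1).2) := by
        show List.foldl _ (pvGStep pairs (s, []) i) rest = _
        have e3 : pvGStep pairs (s, []) i = (p.1, [] ++ [p.2]) := by
          simp only [pvGStep, h, if_neg, not_false_iff]
          rfl
        rw [e3]
        exact pvGF_acc pairs rest p.1 [p.2]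
      simp only [List.foldl_cons, h, if_neg, not_false_iff, e2]
      rw [IH p.1 (pvMax res p.2)]
      rfl

theorem pvMaxAux :
    ∀ (G : List (List Int)) (g : List Int),
      (PySem.List.max? (g :: G) (fun x => x.length)).getD [] = G.foldl pvMax g := by
  intro G
  induction G with
  | nil => intro g; rfl
  | cons x G IH =>
    intro g
    have key : PySem.List.max? (g :: x :: G) (fun y => y.length)
        = PySem.List.max? (pvMax g x :: G) (fun y => y.length) := by
      simp only [PySem.List.max?, List.foldl_cons]
      congr 1
      show (if g.length < x.length then some x else some g) = some (pvMax g x)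
      unfold pvMax
      split_ifs <;> rfl
    rw [key, IH (pvMax g x)]
    rfl

theorem pvMaxFold (G : List (List Int)) :
    (PySem.List.max? G (fun g => g.length)).getD [] = G.foldl pvMax [] := by
  cases G with
  | nil => rfl
  | cons g G =>
    have h1 : pvMax [] g = g := by
      unfold pvMax
      cases g <;> simp
    rw [pvMaxAux G g]
    simp only [List.foldl_cons, h1]

def pvCG (pairs : List (Int × Int)) : List (List Int) :=
  (pvGF pairs (pvAdjA pairs).keys PySem.Set.empty).2

theorem pvOuterA :
    ∀ (vals : List (List (Int × Int))) (res : List Int),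
      vals.foldl
        (fun res pairs =>
          ((pvAdjA pairs).keys.foldl
            (fun (st : PySem.Set Int × List Int) (i : Int) =>
              if PySem.Set.contains st.1 i then st
              else
                ((pvDfs (pvAdjA pairs) (2 * pairs.length + 1) i st.1 []).1,
                 if (pvDfs (pvAdjA pairs) (2 * pairs.length + 1) i st.1 []).2.length > st.2.length then
                   (pvDfs (pvAdjA pairs) (2 * pairs.length + 1) i st.1 []).2
                 else st.2))
            (PySem.Set.empty, res)).2)
        res
      = (vals.flatMap pvCG).foldl pvMax res := by
  intro vals
  induction vals with
  | nil => intro res; rfl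
  | cons pairs vals IH =>
    intro res
    simp only [List.foldl_cons, List.flatMap_cons]
    rw [pvStepA_eq pairs, pvFoldA pairs (pvAdjA pairs).keys PySem.Set.empty res]
    rw [IH, List.foldl_append]
    rfl

theorem pvOuterB :
    ∀ (vals : List (List (Int × Int))) (gs : List (List Int)),
      vals.foldl
        (fun gs pairs =>
          ((pvAdjB pairs).keys.foldl
            (fun (st : PySem.Set Int × List (List Int)) (start : Int) =>
              if PySem.Set.contains st.1 start then st
              else
                ((pvRun (pvAdjB pairs) (2 * pairs.length + 2) [start] st.1 []).1,
                 st.2 ++ [(pvRun (pvAdjB pairs) (2 * pairs.length + 2) [start] st.1 []).2]))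
            (PySem.Set.empty, gs)).2)
        gs
      = gs ++ vals.flatMap pvCG := by
  intro vals
  induction vals with
  | nil => intro gs; simp
  | cons pairs vals IH =>
    intro gs
    simp only [List.foldl_cons, List.flatMap_cons]
    rw [pvStepB_eq pairs]
    have hk : (pvAdjB pairs).keys = (pvAdjA pairs).keys := rfl
    rw [hk, pvGF_acc pairs (pvAdjA pairs).keys PySem.Set.empty gs]
    rw [IH, List.append_assoc]
    rfl

theorem solution_spec : Claim_equal_solution := by
  intro relations _
  unfold Spec_solution
  simp only [solution, solution_alt]
  have hcompany : pvCompanyB relations = pvCompanyA relations := rfl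
  rw [hcompany]
  rw [pvOuterA (pvCompanyA relations).values [], pvOuterB (pvCompanyA relations).values []]
  rw [List.nil_append, pvMaxFold]
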